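-- pv_equiv track=rewrite | github.com/Ellllll/Whoiswho | mind/hgt/scripts/plot_fdh_overlap_graph.py | choose_customers
-- ===== SOURCE A (Python) =====
-- from itertools import combinations
--
-- def choose_customers(customer_terminals, num_customers):
--     customers = list(customer_terminals.keys())
--     pair_scores = []
--     for customer_a, customer_b in combinations(customers, 2):
--         overlap = customer_terminals[customer_a] & customer_terminals[customer_b]
--         if overlap:
--             pair_scores.append((len(overlap), customer_a, customer_b))
--
--     pair_scores.sort(reverse=True)
--     if not pair_scores:
--         return customers[:num_customers]
--
--     _, customer_a, customer_b = pair_scores[0]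
--     selected = [customer_a, customer_b]
--     remaining = [customer for customer in customers if customer not in selected]
--
--     while len(selected) < num_customers and remaining:
--         selected_union = set()
--         for customer in selected:
--             selected_union |= customer_terminals[customer]
--
--         candidate_scores = []
--         for candidate in remaining:
--             pair_overlap = sum(len(customer_terminals[candidate] & customer_terminals[customer]) for customer in selected)
--             union_overlap = len(customer_terminals[candidate] & selected_union)
--             candidate_scores.append((pair_overlap, union_overlap, -len(customer_terminals[candidate]), candidate))
--
--         candidate_scores.sort(reverse=True)
--         selected_customer = candidate_scores[0][3]
--         selected.append(selected_customer)
--         remaining.remove(selected_customer)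
--
--     return selected
-- ===== SOURCE B (Python) =====
-- from itertools import combinations
--
-- def choose_customers(customer_terminals, num_customers):
--     customers = list(customer_terminals.keys())
--
--     # Seed pair: single max-pass over pairs instead of build-list-then-sort.
--     best = None
--     for customer_a, customer_b in combinations(customers, 2):
--         n = len(customer_terminals[customer_a] & customer_terminals[customer_b])
--         if n:
--             t = (n, customer_a, customer_b)
--             if best is None or best < t:
--                 best = t
--
--     if best is None:
--         return customers[:num_customers]
--
--     _, customer_a, customer_b = best
--     selected = [customer_a, customer_b]
--     sel_union = customer_terminals[customer_a] | customer_terminals[customer_b]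
--
--     # Incremental caches: accumulated pairwise overlap and union overlap per candidate.
--     remaining = []
--     pair_ov = {}
--     union_ov = {}
--     for c in customers:
--         if c not in selected:
--             remaining.append(c)
--             tc = customer_terminals[c]
--             pair_ov[c] = len(tc & customer_terminals[customer_a]) + len(tc & customer_terminals[customer_b])
--             union_ov[c] = len(tc & sel_union)
--
--     while len(selected) < num_customers and remaining:
--         pick = max(remaining, key=lambda c: (pair_ov[c], union_ov[c], -len(customer_terminals[c]), c))
--         selected.append(pick)
--         remaining.remove(pick)
--         new = customer_terminals[pick]
--         delta = new - sel_union
--         for c in remaining: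
--             tc = customer_terminals[c]
--             pair_ov[c] += len(tc & new)
--             union_ov[c] += len(tc & delta)
--         sel_union |= new
--
--     return selected
-- ===== Notes on version B (the rewrite author's own statement) =====
-- stated objective: alternative
-- what changed: The seed pair is found by a single running-max pass instead of building and reverse-sorting a pair_scores list, and the greedy loop replaces A's per-step rescoring of every candidate against the whole selected set (plus a full sort per step) with a direct max over incrementally maintained pair-overlap/union-overlap caches and a running selected union, updated per step using only the newly selected customer's terminals.
import Mathlib
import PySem

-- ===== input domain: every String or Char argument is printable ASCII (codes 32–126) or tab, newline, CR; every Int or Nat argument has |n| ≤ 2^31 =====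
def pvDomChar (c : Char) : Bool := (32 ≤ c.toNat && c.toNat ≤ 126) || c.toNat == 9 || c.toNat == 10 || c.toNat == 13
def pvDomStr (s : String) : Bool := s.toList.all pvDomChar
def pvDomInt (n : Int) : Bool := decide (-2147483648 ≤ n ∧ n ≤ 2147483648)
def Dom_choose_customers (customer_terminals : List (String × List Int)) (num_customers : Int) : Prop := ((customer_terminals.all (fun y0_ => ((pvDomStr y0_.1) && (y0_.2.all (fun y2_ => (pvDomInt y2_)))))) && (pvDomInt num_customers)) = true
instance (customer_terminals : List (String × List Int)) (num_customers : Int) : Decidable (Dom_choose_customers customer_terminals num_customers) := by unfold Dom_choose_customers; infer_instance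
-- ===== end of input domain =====

-- B replaces A's per-step rescoring of every candidate against the whole selected set (and its
-- build-list-then-reverse-sort steps) by single max-passes plus incrementally maintained
-- pair-overlap/union-overlap caches and a running selected union; same value everywhere.

-- ===== PORT A =====
-- The dict parameter arrives as an association list; both ports read it through the dict it
-- denotes.  A value list represents a Python set; where it is used as the LEFT operand of a set
-- operation it is read through Set.ofList (tset), the exact port of a stored set per PySem.
def ctGet (ct : List (String × List Int)) (k : String) : List Int :=
  (PySem.Dict.ofList ct).getD k []

def tset (ct : List (String × List Int)) (k : String) : PySem.Set Int :=
  PySem.Set.ofList (ctGet ct k)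

-- Python compares the score tuples lexicographically; key3/key4 embed them into Lex products,
-- whose order is exactly that lexicographic order (Mathlib's `×ₗ`).
def key3 (t : Int × String × String) : Lex (Int × Lex (String × String)) :=
  toLex (t.1, toLex (t.2.1, t.2.2))

def key4 (t : Int × Int × Int × String) : Lex (Int × Lex (Int × Lex (Int × String))) :=
  toLex (t.1, toLex (t.2.1, toLex (t.2.2.1, t.2.2.2)))

-- body of A's `for customer_a, customer_b in combinations(...)` loop
def pairStepA (ct : List (String × List Int)) (acc : List (Int × String × String))
    (pr : List String) : List (Int × String × String) :=
  match pr with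
  | [a, b] =>
    let overlap := PySem.Set.inter (tset ct a) (ctGet ct b)
    if overlap = [] then acc else acc ++ [((overlap.length : Int), a, b)]
  | _ => acc

-- the candidate's score tuple (pair_overlap, union_overlap, -len(terminals), candidate)
def scoreA (ct : List (String × List Int)) (selected : List String) (selUnion : PySem.Set Int)
    (cand : String) : Int × Int × Int × String :=
  ((selected.map (fun c => ((PySem.Set.inter (tset ct cand) (ctGet ct c)).length : Int))).sum,
   ((PySem.Set.inter (tset ct cand) selUnion).length : Int),
   -((tset ct cand).length : Int),
   cand)

-- A's while loop; fuel = |remaining| only makes the recursion structural (each pass removes one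
-- element of remaining, so the fuel never runs out before the loop condition turns false).
def loopA (ct : List (String × List Int)) (num : Int) :
    Nat → List String → List String → List String
  | 0, selected, _ => selected
  | fuel + 1, selected, remaining =>
    if (selected.length : Int) < num ∧ remaining ≠ [] then
      let selUnion := selected.foldl (fun u c => PySem.Set.union u (ctGet ct c)) PySem.Set.empty
      let candidate_scores :=
        remaining.foldl (fun acc cand => acc ++ [scoreA ct selected selUnion cand]) []
      match PySem.List.sorted candidate_scores key4 true with
      | [] => selected
      | t :: _ =>
        loopA ct num fuel (selected ++ [t.2.2.2])
          ((PySem.List.remove? remaining t.2.2.2).getD remaining)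
    else selected

def choose_customers (customer_terminals : List (String × List Int)) (num_customers : Int) :
    List String :=
  let customers := (PySem.Dict.ofList customer_terminals).keys
  let pair_scores :=
    (PySem.List.combinations customers 2).foldl (pairStepA customer_terminals) []
  if pair_scores = [] then PySem.List.slice customers none (some num_customers)
  else
    match PySem.List.sorted pair_scores key3 true with
    | [] => []   -- unreachable: sorting a non-empty list
    | t :: _ =>
      let selected := [t.2.1, t.2.2]
      let remaining := customers.filter (fun c => decide (¬ c ∈ selected))
      loopA customer_terminals num_customers remaining.length selected remaining

-- ===== PORT B =====
-- body of B's seed loop: a running maximum instead of A's list-then-sort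
def pairStepB (ct : List (String × List Int)) (best : Option (Int × String × String))
    (pr : List String) : Option (Int × String × String) :=
  match pr with
  | [a, b] =>
    let n := (PySem.Set.inter (tset ct a) (ctGet ct b)).length
    if n = 0 then best
    else
      let t := ((n : Int), a, b)
      match best with
      | none => some t
      | some bt => if key3 bt < key3 t then some t else some bt
  | _ => best

-- B's while loop with incremental caches: po/uo hold each remaining candidate's accumulated
-- pair overlap and union overlap; selUnion is the running union of the selected terminal sets.
def loopB (ct : List (String × List Int)) (num : Int) :
    Nat → List String → List String → PySem.Dict String Int → PySem.Dict String Int →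
      PySem.Set Int → List String
  | 0, selected, _, _, _, _ => selected
  | fuel + 1, selected, remaining, po, uo, selUnion =>
    if (selected.length : Int) < num ∧ remaining ≠ [] then
      match PySem.List.max? remaining
          (fun c => key4 (po.getD c 0, uo.getD c 0, -((tset ct c).length : Int), c)) with
      | none => selected
      | some pick =>
        let remaining' := (PySem.List.remove? remaining pick).getD remaining
        let nw := ctGet ct pick
        let delta := PySem.Set.diff (tset ct pick) selUnion
        let pu := remaining'.foldl
          (fun (s : PySem.Dict String Int × PySem.Dict String Int) c =>
            (s.1.modify c 0 (· + ((PySem.Set.inter (tset ct c) nw).length : Int)),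
             s.2.modify c 0 (· + ((PySem.Set.inter (tset ct c) delta).length : Int))))
          (po, uo)
        loopB ct num fuel (selected ++ [pick]) remaining' pu.1 pu.2
          (PySem.Set.union selUnion nw)
    else selected

def choose_customers_alt (customer_terminals : List (String × List Int)) (num_customers : Int) :
    List String :=
  let customers := (PySem.Dict.ofList customer_terminals).keys
  match (PySem.List.combinations customers 2).foldl (pairStepB customer_terminals) none with
  | none => PySem.List.slice customers none (some num_customers)
  | some t =>
    let selected := [t.2.1, t.2.2]
    let selUnion := PySem.Set.union (tset customer_terminals t.2.1) (ctGet customer_terminals t.2.2)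
    let init := customers.foldl
      (fun (s : List String × PySem.Dict String Int × PySem.Dict String Int) c =>
        if ¬ c ∈ selected then
          (s.1 ++ [c],
           s.2.1.insert c
             (((PySem.Set.inter (tset customer_terminals c) (ctGet customer_terminals t.2.1)).length : Int)
              + ((PySem.Set.inter (tset customer_terminals c) (ctGet customer_terminals t.2.2)).length : Int)),
           s.2.2.insert c ((PySem.Set.inter (tset customer_terminals c) selUnion).length : Int))
        else s)
      ([], PySem.Dict.empty, PySem.Dict.empty)
    loopB customer_terminals num_customers init.1.length selected init.1 init.2.1 init.2.2 selUnion

-- ===== PRECONDITION & SPEC =====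
def Spec_choose_customers (customer_terminals : List (String × List Int)) (num_customers : Int) (out : List String) : Prop := out = choose_customers_alt customer_terminals num_customers
instance (customer_terminals : List (String × List Int)) (num_customers : Int) (out : List String) : Decidable (Spec_choose_customers customer_terminals num_customers out) := by unfold Spec_choose_customers; infer_instance

-- ===== CLAIM (what is proved, stated in full; the proofs are below) =====
def Claim_equal_choose_customers : Prop := ∀ (customer_terminals : List (String × List Int)) (num_customers : Int), Dom_choose_customers customer_terminals num_customers → Spec_choose_customers customer_terminals num_customers (choose_customers customer_terminals num_customers)

-- ===== LEMMAS AND PROOFS =====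

lemma key3_inj {s t : Int × String × String} (h : key3 s = key3 t) : s = t := by
  obtain ⟨s1, s2, s3⟩ := s; obtain ⟨t1, t2, t3⟩ := t
  simp [key3] at h
  simp [h.1, h.2.1, h.2.2]

lemma key4_inj {s t : Int × Int × Int × String} (h : key4 s = key4 t) : s = t := by
  obtain ⟨s1, s2, s3, s4⟩ := s; obtain ⟨t1, t2, t3, t4⟩ := t
  simp [key4] at h
  simp [h.1, h.2.1, h.2.2.1, h.2.2.2]

lemma getD_foldl_modify_of_not_mem (l : List String) (d : PySem.Dict String Int)
    (g : String → Int) (c : String) (hc : c ∉ l) :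
    (l.foldl (fun d x => d.modify x 0 (· + g x)) d).getD c 0 = d.getD c 0 := by
  induction l generalizing d with
  | nil => rfl
  | cons x xs ih =>
    simp only [List.mem_cons, not_or] at hc
    rw [List.foldl_cons, ih _ hc.2, PySem.Dict.getD_modify_of_ne _ _ _ hc.1]

lemma getD_foldl_modify_of_mem (l : List String) (d : PySem.Dict String Int)
    (g : String → Int) (c : String) (hnd : l.Nodup) (hc : c ∈ l) :
    (l.foldl (fun d x => d.modify x 0 (· + g x)) d).getD c 0 = d.getD c 0 + g c := by
  induction l generalizing d with
  | nil => cases hc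
  | cons x xs ih =>
    rw [List.foldl_cons]
    rcases List.mem_cons.mp hc with h | h
    · subst h
      rw [getD_foldl_modify_of_not_mem _ _ _ _ (List.nodup_cons.mp hnd).1,
        PySem.Dict.getD_modify_self]
    · have hne : c ≠ x := fun he => (List.nodup_cons.mp hnd).1 (he ▸ h)
      rw [ih _ (List.nodup_cons.mp hnd).2 h, PySem.Dict.getD_modify_of_ne _ _ _ hne]

lemma getD_foldl_insert_of_not_mem (l : List String) (d : PySem.Dict String Int)
    (v : String → Int) (c : String) (hc : c ∉ l) :
    (l.foldl (fun d x => d.insert x (v x)) d).getD c 0 = d.getD c 0 := by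
  induction l generalizing d with
  | nil => rfl
  | cons x xs ih =>
    simp only [List.mem_cons, not_or] at hc
    rw [List.foldl_cons, ih _ hc.2, PySem.Dict.getD_insert_of_ne _ _ _ hc.1]

lemma getD_foldl_insert_of_mem (l : List String) (d : PySem.Dict String Int)
    (v : String → Int) (c : String) (hnd : l.Nodup) (hc : c ∈ l) :
    (l.foldl (fun d x => d.insert x (v x)) d).getD c 0 = v c := by
  induction l generalizing d with
  | nil => cases hc
  | cons x xs ih =>
    rw [List.foldl_cons]
    rcases List.mem_cons.mp hc with h | h
    · subst h
      rw [getD_foldl_insert_of_not_mem _ _ _ _ (List.nodup_cons.mp hnd).1,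
        PySem.Dict.getD_insert_self]
    · exact ih _ (List.nodup_cons.mp hnd).2 h

lemma filter_or_split (xs : List Int) (p q : Int → Prop) [DecidablePred p] [DecidablePred q] :
    (xs.filter (fun x => decide (p x ∨ q x))).length
      = (xs.filter (fun x => decide (p x))).length
        + (xs.filter (fun x => decide (q x ∧ ¬ p x))).length := by
  induction xs with
  | nil => rfl
  | cons x xs ih =>
    by_cases hp : p x <;> by_cases hq : q x <;> simp [hp, hq] at ih ⊢ <;> omega

lemma len_inter_union (c U nw : List Int) :
    (PySem.Set.inter c (PySem.Set.union U nw)).length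
      = (PySem.Set.inter c U).length
        + (PySem.Set.inter c (PySem.Set.diff (PySem.Set.ofList nw) U)).length := by
  have e1 : PySem.Set.inter c (PySem.Set.union U nw)
      = c.filter (fun x => decide (x ∈ U ∨ x ∈ nw)) := by
    apply List.filter_congr
    intro x _
    simp [PySem.Set.contains_eq_listContains, List.contains_eq_mem, PySem.Set.mem_union]
  have e2 : PySem.Set.inter c U = c.filter (fun x => decide (x ∈ U)) := by
    apply List.filter_congr
    intro x _
    simp [PySem.Set.contains_eq_listContains, List.contains_eq_mem]
  have e3 : PySem.Set.inter c (PySem.Set.diff (PySem.Set.ofList nw) U)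
      = c.filter (fun x => decide (x ∈ nw ∧ ¬ x ∈ U)) := by
    apply List.filter_congr
    intro x _
    simp [PySem.Set.contains_eq_listContains, List.contains_eq_mem, PySem.Set.mem_diff,
      PySem.Set.mem_ofList]
  rw [e1, e2, e3, filter_or_split]

-- seed phase: the running max in B tracks exactly the maximum of A's pair_scores list
lemma seed_step (ct : List (String × List Int)) (pr : List String)
    (acc : List (Int × String × String)) (best : Option (Int × String × String))
    (h : (acc = [] ∧ best = none) ∨
      (∃ m, best = some m ∧ m ∈ acc ∧ ∀ y ∈ acc, key3 y ≤ key3 m)) :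
    ((pairStepA ct acc pr = [] ∧ pairStepB ct best pr = none) ∨
      (∃ m, pairStepB ct best pr = some m ∧ m ∈ pairStepA ct acc pr ∧
        ∀ y ∈ pairStepA ct acc pr, key3 y ≤ key3 m)) := by
  match pr with
  | [] => exact h
  | [a] => exact h
  | a :: b :: x :: r => exact h
  | [a, b] =>
    simp only [pairStepA, pairStepB]
    by_cases hov : PySem.Set.inter (tset ct a) (ctGet ct b) = []
    · have hlen : (PySem.Set.inter (tset ct a) (ctGet ct b)).length = 0 :=
        List.length_eq_zero_iff.mpr hov
      rw [if_pos hov, if_pos hlen]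
      exact h
    · have hlen : ¬ (PySem.Set.inter (tset ct a) (ctGet ct b)).length = 0 := by
        simpa [List.length_eq_zero_iff] using hov
      rw [if_neg hov, if_neg hlen]
      rcases h with ⟨hacc, hbest⟩ | ⟨m, hbest, hmem, hmax⟩
      · subst hacc; subst hbest
        refine Or.inr ⟨_, rfl, by simp, ?_⟩
        intro y hy
        simp only [List.nil_append, List.mem_singleton] at hy
        subst hy; exact le_refl _
      · subst hbest
        by_cases hcmp : key3 m
            < key3 (((PySem.Set.inter (tset ct a) (ctGet ct b)).length : Int), a, b)
        · refine Or.inr ⟨(((PySem.Set.inter (tset ct a) (ctGet ct b)).length : Int), a, b),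
            by simp [hcmp], List.mem_append_right _ (by simp), ?_⟩
          intro y hy
          rcases List.mem_append.mp hy with hy | hy
          · exact le_of_lt (lt_of_le_of_lt (hmax y hy) hcmp)
          · simp only [List.mem_singleton] at hy; subst hy; exact le_refl _
        · refine Or.inr ⟨m, by simp [hcmp], List.mem_append_left _ hmem, ?_⟩
          intro y hy
          rcases List.mem_append.mp hy with hy | hy
          · exact hmax y hy
          · simp only [List.mem_singleton] at hy; subst hy; exact le_of_not_gt hcmp

lemma seed_bridge (ct : List (String × List Int)) (l : List (List String)) :
    ∀ (acc : List (Int × String × String)) (best : Option (Int × String × String)),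
      ((acc = [] ∧ best = none) ∨
        (∃ m, best = some m ∧ m ∈ acc ∧ ∀ y ∈ acc, key3 y ≤ key3 m)) →
      ((l.foldl (pairStepA ct) acc = [] ∧ l.foldl (pairStepB ct) best = none) ∨
        (∃ m, l.foldl (pairStepB ct) best = some m ∧ m ∈ l.foldl (pairStepA ct) acc ∧
          ∀ y ∈ l.foldl (pairStepA ct) acc, key3 y ≤ key3 m)) := by
  induction l with
  | nil => intro acc best h; exact h
  | cons pr rest ih =>
    intro acc best h
    rw [List.foldl_cons, List.foldl_cons]
    exact ih _ _ (seed_step ct pr acc best h)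

-- the two while loops agree whenever B's caches mean what they should
lemma loop_eq (ct : List (String × List Int)) (num : Int) (fuel : Nat) :
    ∀ (selected remaining : List String) (po uo : PySem.Dict String Int) (U : PySem.Set Int),
      remaining.Nodup →
      U = selected.foldl (fun u c => PySem.Set.union u (ctGet ct c)) PySem.Set.empty →
      (∀ c ∈ remaining, po.getD c 0
        = (selected.map (fun s => ((PySem.Set.inter (tset ct c) (ctGet ct s)).length : Int))).sum) →
      (∀ c ∈ remaining, uo.getD c 0 = ((PySem.Set.inter (tset ct c) U).length : Int)) →
      loopA ct num fuel selected remaining = loopB ct num fuel selected remaining po uo U := by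
  induction fuel with
  | zero => intro selected remaining po uo U _ _ _ _; rfl
  | succ fuel ih =>
    intro selected remaining po uo U hnd hU hpo huo
    simp only [loopA, loopB]
    by_cases hcond : (selected.length : Int) < num ∧ remaining ≠ []
    · rw [if_pos hcond, if_pos hcond]
      obtain ⟨hlen, hne⟩ := hcond
      -- B picks its maximum
      obtain ⟨pick, hmax⟩ : ∃ p, PySem.List.max? remaining
          (fun c => key4 (po.getD c 0, uo.getD c 0, -((tset ct c).length : Int), c)) = some p := by
        rcases hp : PySem.List.max? remaining
            (fun c => key4 (po.getD c 0, uo.getD c 0, -((tset ct c).length : Int), c)) with _ | p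
        · exact absurd ((PySem.List.max?_eq_none_iff _ _).mp hp) hne
        · exact ⟨p, rfl⟩
      have hpick_mem : pick ∈ remaining := PySem.List.max?_mem hmax
      have hpick_max := PySem.List.max?_isMax hmax
      rw [hmax]
      -- A's recomputed union is U, and its score list is a map
      simp only [← hU, PySem.List.foldl_append_singleton_eq_map, List.nil_append]
      -- A's sorted score list is non-empty
      rcases hsrt : PySem.List.sorted (remaining.map (scoreA ct selected U)) key4 true
          with _ | ⟨t, tail⟩
      · exact absurd (List.map_eq_nil_iff.mp ((PySem.List.sorted_eq_nil_iff _ _ _).mp hsrt)) hne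
      · dsimp only
        -- A's head is B's pick
        obtain ⟨c₀, hc₀_mem, hc₀⟩ := List.mem_map.mp
          ((PySem.List.mem_sorted _ _ _ _).mp (hsrt ▸ List.mem_cons_self (l := tail)))
        have hk : ∀ y ∈ remaining,
            key4 (po.getD y 0, uo.getD y 0, -((tset ct y).length : Int), y)
              = key4 (scoreA ct selected U y) := by
          intro y hy
          simp only [scoreA, hpo y hy, huo y hy]
        have h1 : key4 (scoreA ct selected U pick) ≤ key4 t :=
          PySem.List.key_head_sorted_rev_ge _ _ hsrt _ (List.mem_map_of_mem hpick_mem)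
        have h2 : key4 t ≤ key4 (scoreA ct selected U pick) := by
          rw [← hc₀]
          have := hpick_max c₀ hc₀_mem
          rwa [hk c₀ hc₀_mem, hk pick hpick_mem] at this
        have ht : t = scoreA ct selected U pick := key4_inj (le_antisymm h2 h1)
        have htp : t.2.2.2 = pick := by rw [ht]; rfl
        rw [htp]
        -- the removal really erases
        rw [PySem.List.remove?_eq_some_erase remaining pick hpick_mem, Option.getD_some]
        -- split B's paired cache update into its two folds
        rw [PySem.List.foldl_prod_mk
          (f := fun d c => PySem.Dict.modify d c 0
            (· + ((PySem.Set.inter (tset ct c) (ctGet ct pick)).length : Int)))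
          (g := fun d c => PySem.Dict.modify d c 0
            (· + ((PySem.Set.inter (tset ct c) (PySem.Set.diff (tset ct pick) U)).length : Int)))]
        -- recurse with the re-established invariants
        apply ih
        · exact hnd.erase pick
        · rw [List.foldl_append, ← hU]; rfl
        · intro c hc
          have hcr : c ∈ remaining := List.mem_of_mem_erase hc
          rw [getD_foldl_modify_of_mem _ _ _ _ (hnd.erase pick) hc, hpo c hcr]
          simp [List.map_append]
        · intro c hc
          have hcr : c ∈ remaining := List.mem_of_mem_erase hc
          rw [getD_foldl_modify_of_mem _ _ _ _ (hnd.erase pick) hc, huo c hcr]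
          have := len_inter_union (tset ct c) U (ctGet ct pick)
          simp only [tset] at *
          omega
    · rw [if_neg hcond, if_neg hcond]

-- ===== VERDICT (by name: the statement is the Claim_ definition above) =====
theorem choose_customers_spec : Claim_equal_choose_customers := by
  intro ct num _
  unfold Spec_choose_customers
  show choose_customers ct num = choose_customers_alt ct num
  simp only [choose_customers, choose_customers_alt]
  have hbr := seed_bridge ct (PySem.List.combinations ((PySem.Dict.ofList ct).keys) 2) [] none
    (Or.inl ⟨rfl, rfl⟩)
  rcases hbr with ⟨hA, hB⟩ | ⟨m, hB, hmem, hmaxB⟩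
  · rw [hB, hA]; rfl
  · rw [hB]
    have hpsne : (PySem.List.combinations ((PySem.Dict.ofList ct).keys) 2).foldl
        (pairStepA ct) [] ≠ [] := fun h => by rw [h] at hmem; cases hmem
    rw [if_neg hpsne]
    rcases hsrt : PySem.List.sorted ((PySem.List.combinations ((PySem.Dict.ofList ct).keys) 2).foldl
        (pairStepA ct) []) key3 true with _ | ⟨t, tail⟩
    · exact absurd ((PySem.List.sorted_eq_nil_iff _ _ _).mp hsrt) hpsne
    · dsimp only
      have htm : t = m := by
        have h1 : key3 t ≤ key3 m :=
          hmaxB t ((PySem.List.mem_sorted _ _ _ _).mp (hsrt ▸ List.mem_cons_self (l := tail)))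
        have h2 : key3 m ≤ key3 t := PySem.List.key_head_sorted_rev_ge _ _ hsrt m hmem
        exact key3_inj (le_antisymm h1 h2)
      rw [htm]
      rw [PySem.List.foldl_ite_eq_foldl_filter
        (p := fun c => ¬ c ∈ [m.2.1, m.2.2])
        (f := fun (s : List String × PySem.Dict String Int × PySem.Dict String Int) c =>
          (s.1 ++ [c],
           s.2.1.insert c
             (((PySem.Set.inter (tset ct c) (ctGet ct m.2.1)).length : Int)
              + ((PySem.Set.inter (tset ct c) (ctGet ct m.2.2)).length : Int)),
           s.2.2.insert c ((PySem.Set.inter (tset ct c)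
             (PySem.Set.union (tset ct m.2.1) (ctGet ct m.2.2))).length : Int)))]
      rw [PySem.List.foldl_prod_mk
        (f := fun (l : List String) c => l ++ [c])
        (g := fun (s2 : PySem.Dict String Int × PySem.Dict String Int) c =>
          (s2.1.insert c
             (((PySem.Set.inter (tset ct c) (ctGet ct m.2.1)).length : Int)
              + ((PySem.Set.inter (tset ct c) (ctGet ct m.2.2)).length : Int)),
           s2.2.insert c ((PySem.Set.inter (tset ct c)
             (PySem.Set.union (tset ct m.2.1) (ctGet ct m.2.2))).length : Int)))]
      rw [PySem.List.foldl_prod_mk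
        (f := fun (d : PySem.Dict String Int) c => d.insert c
             (((PySem.Set.inter (tset ct c) (ctGet ct m.2.1)).length : Int)
              + ((PySem.Set.inter (tset ct c) (ctGet ct m.2.2)).length : Int)))
        (g := fun (d : PySem.Dict String Int) c => d.insert c
             ((PySem.Set.inter (tset ct c)
               (PySem.Set.union (tset ct m.2.1) (ctGet ct m.2.2))).length : Int))]
      rw [PySem.List.foldl_append_singleton_eq_self, List.nil_append]
      dsimp only
      apply loop_eq
      · exact (PySem.Dict.nodup_keys_ofList ct).filter _
      · rfl
      · intro c hc
        rw [getD_foldl_insert_of_mem _ _ _ _ ((PySem.Dict.nodup_keys_ofList ct).filter _) hc]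
        simp
      · intro c hc
        rw [getD_foldl_insert_of_mem _ _ _ _ ((PySem.Dict.nodup_keys_ofList ct).filter _) hc]
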